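-- pv_equiv track=rewrite | github.com/janjonaash05/py_collection_proofs | confluences.py | get_cities_by_river
-- ===== SOURCE A (Python) =====
-- rivers_confluences_dict = \
--     {
--         "Sazava": ("Cikhaj", ["Davle", "Vltava", False]),
--         "Vltava": ("Kvilda", ["Melnik", "Labe", False]),
--         "Labe": ("Spindleruv Mlyn", ["Hradec Kralove", "Orlice", True]),
--         "Dedina": ("Olesnice", ["Trebechovice", "Orlice", False]),
--         "Otava": ("Relstejn", ["Zvikov", "Vltava", False]),
--     }
--
-- def get_cities_by_river(river):
--     cities = set()
--     if river in rivers_confluences_dict.keys():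
--         cities.add(rivers_confluences_dict[river][0])
--         cities.add(rivers_confluences_dict[river][1][0])
--
--     for r in rivers_confluences_dict.keys():
--         if river == rivers_confluences_dict[r][1][1]:
--             cities.add(rivers_confluences_dict[r][1][0])
--     return cities
-- ===== SOURCE B (Python) =====
-- rivers_confluences_dict = \
--     {
--         "Sazava": ("Cikhaj", ["Davle", "Vltava", False]),
--         "Vltava": ("Kvilda", ["Melnik", "Labe", False]),
--         "Labe": ("Spindleruv Mlyn", ["Hradec Kralove", "Orlice", True]),
--         "Dedina": ("Olesnice", ["Trebechovice", "Orlice", False]),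
--         "Otava": ("Relstejn", ["Zvikov", "Vltava", False]),
--     }
--
-- # Precomputed reverse index built once at module load: river -> list of its cities.
-- # Phase 1 records each river's own source and confluence city; phase 2 records,
-- # for every entry, its confluence city under the river it flows into.
-- _cities_index = {}
-- for _r, (_source, _conf) in rivers_confluences_dict.items():
--     _cities_index.setdefault(_r, []).extend((_source, _conf[0]))
-- for _r, (_source, _conf) in rivers_confluences_dict.items():
--     _cities_index.setdefault(_conf[1], []).append(_conf[0])
--
-- def get_cities_by_river(river):
--     return set(_cities_index.get(river, []))
-- ===== Notes on version B (the rewrite author's own statement) =====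
-- stated objective: alternative
-- what changed: Replaces A's per-call membership test plus full scan over the dict with a reverse index (river -> its cities) precomputed once at module load in two staged passes, so each call is a single dict lookup.
import Mathlib
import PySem

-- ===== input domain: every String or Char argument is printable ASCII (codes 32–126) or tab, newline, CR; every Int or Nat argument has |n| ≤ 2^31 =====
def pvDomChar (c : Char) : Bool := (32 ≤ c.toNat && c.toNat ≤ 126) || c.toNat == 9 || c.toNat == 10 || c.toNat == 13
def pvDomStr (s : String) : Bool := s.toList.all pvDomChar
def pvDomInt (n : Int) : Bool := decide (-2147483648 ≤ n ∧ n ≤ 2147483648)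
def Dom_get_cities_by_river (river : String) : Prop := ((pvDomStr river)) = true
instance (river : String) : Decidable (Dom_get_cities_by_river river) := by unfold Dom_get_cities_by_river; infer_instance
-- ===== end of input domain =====

-- B precomputes a reverse index (river -> its cities) once from the fixed dict and answers each query by a single lookup (objective: alternative).

-- shared module-level constant (the fixed dict from the Python module)
def rivers_confluences_dict : PySem.Dict String (String × (String × String × Bool)) :=
  PySem.Dict.ofList
  [("Sazava", ("Cikhaj", ("Davle", "Vltava", false))),
   ("Vltava", ("Kvilda", ("Melnik", "Labe", false))),
   ("Labe", ("Spindleruv Mlyn", ("Hradec Kralove", "Orlice", true))),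
   ("Dedina", ("Olesnice", ("Trebechovice", "Orlice", false))),
   ("Otava", ("Relstejn", ("Zvikov", "Vltava", false)))]

-- ===== PORT A =====
def get_cities_by_river (river : String) : List String :=
  let cities : PySem.Set String := PySem.Set.empty
  let cities :=
    if (PySem.Dict.keys rivers_confluences_dict).contains river then
      match PySem.Dict.get? rivers_confluences_dict river with
      | some v => PySem.Set.add (PySem.Set.add cities v.1) v.2.1
      | none => cities           -- unreachable: guarded by the membership test
    else cities
  (PySem.Dict.keys rivers_confluences_dict).foldl
    (fun cs r =>
      match PySem.Dict.get? rivers_confluences_dict r with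
      | some v => if river == v.2.2.1 then PySem.Set.add cs v.2.1 else cs
      | none => cs)              -- unreachable: r ranges over keys
    cities

-- ===== PORT B =====
-- the module-level precomputed index: two passes over items() building river -> list of cities
-- (setdefault(k, []).extend/append ported as insert k (getD k [] ++ …), which matches Python's in-place update / append-at-end)
def cities_index : PySem.Dict String (List String) :=
  let d := (PySem.Dict.items rivers_confluences_dict).foldl
    (fun d p => PySem.Dict.insert d p.1 (PySem.Dict.getD d p.1 [] ++ [p.2.1, p.2.2.1]))
    PySem.Dict.empty
  (PySem.Dict.items rivers_confluences_dict).foldl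
    (fun d p => PySem.Dict.insert d p.2.2.2.1 (PySem.Dict.getD d p.2.2.2.1 [] ++ [p.2.2.1]))
    d

def get_cities_by_river_alt (river : String) : List String :=
  PySem.Set.ofList (PySem.Dict.getD cities_index river [])

-- ===== PRECONDITION & SPEC =====
def Spec_get_cities_by_river (river : String) (out : List String) : Prop := out = get_cities_by_river_alt river
instance (river : String) (out : List String) : Decidable (Spec_get_cities_by_river river out) := by unfold Spec_get_cities_by_river; infer_instance

-- ===== CLAIM (what is proved, stated in full; the proofs are below) =====
def Claim_equal_get_cities_by_river : Prop := ∀ (river : String), Dom_get_cities_by_river river → Spec_get_cities_by_river river (get_cities_by_river river)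

-- ===== LEMMAS AND PROOFS =====

-- the fixed dict, with ofList evaluated away
theorem rivers_dict_mk : rivers_confluences_dict = PySem.Dict.mk
  [("Sazava", ("Cikhaj", ("Davle", "Vltava", false))),
   ("Vltava", ("Kvilda", ("Melnik", "Labe", false))),
   ("Labe", ("Spindleruv Mlyn", ("Hradec Kralove", "Orlice", true))),
   ("Dedina", ("Olesnice", ("Trebechovice", "Orlice", false))),
   ("Otava", ("Relstejn", ("Zvikov", "Vltava", false)))] := by decide

-- the precomputed index, fully evaluated
theorem cities_index_mk : cities_index = PySem.Dict.mk
  [("Sazava", ["Cikhaj", "Davle"]),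
   ("Vltava", ["Kvilda", "Melnik", "Davle", "Zvikov"]),
   ("Labe", ["Spindleruv Mlyn", "Hradec Kralove", "Melnik"]),
   ("Dedina", ["Olesnice", "Trebechovice"]),
   ("Otava", ["Relstejn", "Zvikov"]),
   ("Orlice", ["Hradec Kralove", "Trebechovice"])] := by decide

-- ===== VERDICT (by name: the statement is the Claim_ definition above) =====
theorem get_cities_by_river_spec : Claim_equal_get_cities_by_river := by
  intro river _
  unfold Spec_get_cities_by_river
  by_cases h1 : river = "Sazava"; · subst h1; decide
  by_cases h2 : river = "Vltava"; · subst h2; decide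
  by_cases h3 : river = "Labe"; · subst h3; decide
  by_cases h4 : river = "Dedina"; · subst h4; decide
  by_cases h5 : river = "Otava"; · subst h5; decide
  by_cases h6 : river = "Orlice"; · subst h6; decide
  simp only [get_cities_by_river, get_cities_by_river_alt, rivers_dict_mk, cities_index_mk]
  simp [PySem.Dict.keys, PySem.Dict.get?, PySem.Dict.getD,
        h1, h2, h3, h4, h5, h6,
        Ne.symm h1, Ne.symm h2, Ne.symm h3, Ne.symm h4, Ne.symm h5, Ne.symm h6]
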